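-- pv_equiv track=rewrite | github.com/Bennylikescoding/Udacity_DataStructureAndAlgorithm_P2 | Problem 3_Rearrange Array Elements.py | get_two_number
-- ===== SOURCE A (Python) =====
-- def get_two_number(sorted_list):
--
--     last_index = len(sorted_list) - 1 # Get last index
--     left_number = ''
--     right_number = ''
--     while last_index >= 0: # Time complexity is O(n)
--         left_number += str(sorted_list[last_index])
--         if last_index > 0: # Avoid situation that the last_index = 0, and the right_number will return sorted_list[-1]
--             right_number += str(sorted_list[last_index - 1])
--         last_index -= 2 # move to the next second number, which ensures we get an index array of even or odd numbers (5,3,1..., or 6,4,2,0).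
--
--     left_number = int(left_number)
--     right_number = int(right_number)
--
--     return [left_number, right_number]
-- ===== SOURCE B (Python) =====
-- def get_two_number(sorted_list):
--     rev = sorted_list[::-1]
--     left_number = int(''.join(str(x) for x in rev[0::2]))
--     right_number = int(''.join(str(x) for x in rev[1::2]))
--     return [left_number, right_number]
-- ===== Notes on version B (the rewrite author's own statement) =====
-- stated objective: idiomatic
-- what changed: A's single downward while-loop (counter decremented by 2, conditional second append into two string accumulators) is replaced by reversing the list once and joining two strided slices rev[0::2] and rev[1::2] separately.
import Mathlib
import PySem

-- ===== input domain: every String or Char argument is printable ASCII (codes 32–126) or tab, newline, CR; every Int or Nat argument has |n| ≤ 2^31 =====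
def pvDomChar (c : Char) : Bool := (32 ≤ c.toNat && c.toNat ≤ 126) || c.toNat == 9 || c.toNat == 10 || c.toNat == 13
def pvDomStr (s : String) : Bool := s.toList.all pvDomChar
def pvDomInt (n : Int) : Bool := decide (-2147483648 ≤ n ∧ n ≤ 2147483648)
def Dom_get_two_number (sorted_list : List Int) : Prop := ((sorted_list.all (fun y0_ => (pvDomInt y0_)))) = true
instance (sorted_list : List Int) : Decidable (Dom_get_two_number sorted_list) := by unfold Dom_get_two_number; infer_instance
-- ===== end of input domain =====

-- B replaces A's single downward counter loop (decrement by 2, conditional second append) by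
-- reversing once and joining two strided slices rev[0::2] / rev[1::2] — idiomatic decomposition, same cost.
-- Python strings are modelled as List Char throughout (exact; PySem.Chars/Int.toChars/ofChars?).

-- ===== PORT A =====
-- while last_index >= 0: left += str(l[last_index]); if last_index > 0: right += str(l[last_index-1]); last_index -= 2
-- (the pyGet? indices are always in range when called from get_two_number, so .getD 0 is never taken)
def getTwoLoop (sorted_list : List Int) (last_index : Int) (left right : List Char) : List Char × List Char :=
  if _h : last_index ≥ 0 then
    let left := left ++ PySem.Int.toChars ((PySem.List.pyGet? sorted_list last_index).getD 0)
    let right := if last_index > 0 then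
        right ++ PySem.Int.toChars ((PySem.List.pyGet? sorted_list (last_index - 1)).getD 0)
      else right
    getTwoLoop sorted_list (last_index - 2) left right
  else (left, right)
termination_by (last_index + 1).toNat
decreasing_by omega

-- int('') / int('5-3') raises ValueError (ofChars? = none): Pre_ excludes exactly those inputs, so .getD 0 is never taken on Pre_
def get_two_number (sorted_list : List Int) : List Int :=
  let last_index : Int := (sorted_list.length : Int) - 1
  let lr := getTwoLoop sorted_list last_index [] []
  [(PySem.Int.ofChars? lr.1).getD 0, (PySem.Int.ofChars? lr.2).getD 0]

-- ===== PORT B =====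
-- rev = l[::-1]; int(''.join(str(x) for x in rev[0::2])), int(''.join(str(x) for x in rev[1::2]))
-- (slice? returns none only for step 0, so .getD [] is never taken; int('') as in port A)
def get_two_number_alt (sorted_list : List Int) : List Int :=
  let rev := (PySem.List.slice? sorted_list none none (-1)).getD []
  let left_number :=
    (PySem.Int.ofChars? (PySem.Chars.join []
      (((PySem.List.slice? rev (some 0) none 2).getD []).map PySem.Int.toChars))).getD 0
  let right_number :=
    (PySem.Int.ofChars? (PySem.Chars.join []
      (((PySem.List.slice? rev (some 1) none 2).getD []).map PySem.Int.toChars))).getD 0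
  [left_number, right_number]

-- ===== PRECONDITION & SPEC =====
-- Pre_ excludes exactly the inputs where Python A raises ValueError from int(): lists of length < 2
-- (int('') on the empty digit string) and lists with a negative element anywhere except the last two
-- positions (a '-' sign lands in the middle of a concatenated digit string). B raises there too.
def Pre_get_two_number (sorted_list : List Int) : Prop :=
  2 ≤ sorted_list.length ∧ ∀ x ∈ sorted_list.take (sorted_list.length - 2), 0 ≤ x
instance (sorted_list : List Int) : Decidable (Pre_get_two_number sorted_list) := by
  unfold Pre_get_two_number; infer_instance

def pvWitness_get_two_number : List Int := [1, 2, 3]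

def Spec_get_two_number (sorted_list : List Int) (out : List Int) : Prop := out = get_two_number_alt sorted_list
instance (sorted_list : List Int) (out : List Int) : Decidable (Spec_get_two_number sorted_list out) := by unfold Spec_get_two_number; infer_instance

-- ===== CLAIM (what is proved, stated in full; the proofs are below) =====
def Claim_equal_get_two_number : Prop := ∀ (sorted_list : List Int), Dom_get_two_number sorted_list → Pre_get_two_number sorted_list → Spec_get_two_number sorted_list (get_two_number sorted_list)

-- ===== LEMMAS AND PROOFS =====

-- the elements at indices 0, 2, 4, … of a list
def everyOther : List Int → List Int
  | [] => []
  | [x] => [x]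
  | x :: _ :: t => x :: everyOther t

theorem everyOther_nil : everyOther [] = [] := rfl

theorem everyOther_cons (x : Int) (t : List Int) :
    everyOther (x :: t) = x :: everyOther t.tail := by
  cases t <;> rfl

theorem getTwoLoop_neg (xs : List Int) (i : Int) (l r : List Char) (h : i < 0) :
    getTwoLoop xs i l r = (l, r) := by
  rw [getTwoLoop]
  simp only [ge_iff_le, show ¬ (0 ≤ i) by omega, dite_false]

theorem getTwoLoop_step (xs : List Int) (i : Int) (l r : List Char) (h : 0 ≤ i) :
    getTwoLoop xs i l r
      = getTwoLoop xs (i - 2)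
          (l ++ PySem.Int.toChars ((PySem.List.pyGet? xs i).getD 0))
          (if i > 0 then r ++ PySem.Int.toChars ((PySem.List.pyGet? xs (i - 1)).getD 0) else r) := by
  conv_lhs => rw [getTwoLoop]
  simp only [ge_iff_le, h, dite_true]

theorem pyGet?_append_of_lt (xs ys : List Int) (i : Int) (h0 : 0 ≤ i) (h : i < (xs.length : Int)) :
    PySem.List.pyGet? (xs ++ ys) i = PySem.List.pyGet? xs i := by
  rw [PySem.List.pyGet?_of_nonneg _ h0, PySem.List.pyGet?_of_nonneg _ h0]
  exact List.getElem?_append_left (by omega)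

theorem getTwoLoop_append (n : Nat) (i : Int) (xs ys : List Int) (l r : List Char)
    (hn : i.toNat ≤ n) (h : i < (xs.length : Int)) :
    getTwoLoop (xs ++ ys) i l r = getTwoLoop xs i l r := by
  induction n generalizing i l r with
  | zero =>
    by_cases hneg : i < 0
    · rw [getTwoLoop_neg _ _ _ _ hneg, getTwoLoop_neg _ _ _ _ hneg]
    · have hi : i = 0 := by omega
      subst hi
      rw [getTwoLoop_step (xs ++ ys) 0 l r le_rfl, getTwoLoop_step xs 0 l r le_rfl]
      rw [pyGet?_append_of_lt xs ys 0 le_rfl h]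
      simp only [show ¬ ((0:Int) > 0) by omega, if_false]
      rw [getTwoLoop_neg _ _ _ _ (by omega), getTwoLoop_neg _ _ _ _ (by omega)]
  | succ m ih =>
    by_cases hneg : i < 0
    · rw [getTwoLoop_neg _ _ _ _ hneg, getTwoLoop_neg _ _ _ _ hneg]
    · rw [getTwoLoop_step (xs ++ ys) i l r (by omega), getTwoLoop_step xs i l r (by omega)]
      rw [pyGet?_append_of_lt xs ys i (by omega) h]
      by_cases hpos : i > 0
      · simp only [hpos, if_true]
        rw [pyGet?_append_of_lt xs ys (i - 1) (by omega) (by omega)]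
        by_cases h2 : i - 2 < 0
        · rw [getTwoLoop_neg _ _ _ _ h2, getTwoLoop_neg _ _ _ _ h2]
        · exact ih (i - 2) _ _ (by omega) (by omega)
      · simp only [hpos, if_false]
        by_cases h2 : i - 2 < 0
        · rw [getTwoLoop_neg _ _ _ _ h2, getTwoLoop_neg _ _ _ _ h2]
        · exact ih (i - 2) _ _ (by omega) (by omega)

theorem getTwoLoop_rev : ∀ (rev : List Int) (l r : List Char),
    getTwoLoop rev.reverse ((rev.length : Int) - 1) l r
      = (l ++ (everyOther rev).flatMap PySem.Int.toChars,
         r ++ (everyOther rev.tail).flatMap PySem.Int.toChars)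
  | [], l, r => by
    rw [getTwoLoop_neg _ _ _ _ (by simp)]
    simp [everyOther_nil]
  | [a], l, r => by
    have h1 : ([a] : List Int).reverse = [a] := by simp
    have h2 : (([a] : List Int).length : Int) - 1 = 0 := by simp
    rw [h1, h2, getTwoLoop_step [a] 0 l r le_rfl]
    simp only [show ¬ ((0:Int) > 0) by omega, if_false]
    rw [getTwoLoop_neg _ _ _ _ (by omega)]
    simp [everyOther_cons, everyOther_nil]
  | a :: b :: t, l, r => by
    have key := getTwoLoop_rev t
    have hlen : ((a :: b :: t).length : Int) - 1 = ((t.length : Int)) + 1 := by simp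
    have hrev : (a :: b :: t).reverse = t.reverse ++ [b, a] := by simp
    rw [hlen, hrev, getTwoLoop_step _ _ _ _ (by omega)]
    simp only [show ((t.length : Int)) + 1 > 0 by omega, if_true]
    have hA : PySem.List.pyGet? (t.reverse ++ [b, a]) ((t.length : Int) + 1) = some a := by
      have h1 : t.reverse ++ [b, a] = (t.reverse ++ [b]) ++ a :: [] := by simp
      have hl : ((t.length : Int) + 1) = (((t.reverse ++ [b]).length : Nat) : Int) := by simp
      rw [h1, hl]
      exact PySem.List.pyGet?_append_length (t.reverse ++ [b]) [] a
    have hB : PySem.List.pyGet? (t.reverse ++ [b, a]) ((t.length : Int) + 1 - 1) = some b := by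
      have hl : ((t.length : Int) + 1 - 1) = ((t.reverse.length : Nat) : Int) := by simp
      rw [hl]
      exact PySem.List.pyGet?_append_length t.reverse [a] b
    rw [hA, hB]
    simp only [Option.getD_some]
    rw [show (t.length : Int) + 1 - 2 = (t.length : Int) - 1 by omega]
    by_cases ht : t = []
    · subst ht
      rw [getTwoLoop_neg _ _ _ _ (by norm_num)]
      simp [everyOther_cons, everyOther_nil]
    · rw [getTwoLoop_append t.length _ t.reverse [b, a] _ _ (by omega)
        (by rw [List.length_reverse]; omega)]
      rw [key]
      simp [everyOther_cons, List.flatMap_def]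
termination_by rev => rev.length

-- rev[k::2] as everyOther
theorem range_filterMap_everyOther : ∀ (xs : List Int),
    (List.range ((xs.length + 1) / 2)).filterMap (fun k => xs[2 * k]?) = everyOther xs
  | [] => by simp [everyOther_nil]
  | [a] => by simp [everyOther_cons, everyOther_nil, List.range_succ]
  | a :: b :: t => by
    have ih := range_filterMap_everyOther t
    have hlen : ((a :: b :: t).length + 1) / 2 = (t.length + 1) / 2 + 1 := by simp; omega
    rw [hlen, List.range_succ_eq_map, List.filterMap_cons, List.filterMap_map]
    simp only [Nat.mul_zero, List.getElem?_cons_zero]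
    have hf : ∀ k : Nat, (a :: b :: t)[2 * (k + 1)]? = t[2 * k]? := by
      intro k
      rw [show 2 * (k + 1) = 2 * k + 1 + 1 by omega]
      simp
    rw [everyOther_cons a (b :: t)]
    simp only [Function.comp_def, hf, ih, List.tail_cons]
termination_by xs => xs.length

theorem slice?_two_zero (xs : List Int) :
    PySem.List.slice? xs (some 0) none 2 = some (everyOther xs) := by
  rw [← range_filterMap_everyOther]
  simp only [PySem.List.slice?, PySem.List.sliceIndices]
  norm_num
  have hc : (if 0 < xs.length then (((xs.length : Int) + 2 - 1) / 2).toNat else 0)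
      = (xs.length + 1) / 2 := by split <;> omega
  rw [hc]
  apply List.filterMap_congr
  intro k _
  have h2 : ((2 : Int) * (k : Nat)).toNat = 2 * k := by omega
  rw [h2]

theorem slice?_two_one (xs : List Int) :
    PySem.List.slice? xs (some 1) none 2 = some (everyOther xs.tail) := by
  have hr : (List.range (xs.length / 2)).filterMap (fun k => xs[2 * k + 1]?)
      = everyOther xs.tail := by
    cases xs with
    | nil => simp [everyOther_nil]
    | cons a t =>
      simp only [List.length_cons, List.tail_cons]
      rw [← range_filterMap_everyOther t]
      apply List.filterMap_congr
      intro k _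
      simp
  rw [← hr]
  simp only [PySem.List.slice?, PySem.List.sliceIndices]
  norm_num
  by_cases hl : xs.length = 0
  · simp [hl]
  · have hmin : min 1 ((xs.length : Nat) : Int) = 1 := by omega
    rw [hmin]
    have hc : (if 1 < xs.length then (((xs.length : Int) - 1 + 2 - 1) / 2).toNat else 0)
        = xs.length / 2 := by split <;> omega
    rw [hc]
    apply List.filterMap_congr
    intro k _
    have h2 : ((1 : Int) + 2 * (k : Nat)).toNat = 2 * k + 1 := by omega
    rw [h2]

theorem intercalate_nil_flatten (xs : List (List Char)) :
    ([] : List Char).intercalate xs = xs.flatten := by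
  induction xs with
  | nil => simp [List.intercalate]
  | cons a t ih => cases t <;> simp_all [List.intercalate, List.intersperse]

-- ===== VERDICT (by name: the statement is the Claim_ definition above) =====
theorem get_two_number_spec : Claim_equal_get_two_number := by
  intro sorted_list _hdom _hpre
  unfold Spec_get_two_number get_two_number get_two_number_alt
  rw [PySem.List.slice?_none_none_neg_one]
  simp only [Option.getD_some]
  rw [slice?_two_zero, slice?_two_one]
  simp only [Option.getD_some, PySem.Chars.join, intercalate_nil_flatten]
  have h := getTwoLoop_rev sorted_list.reverse [] []
  simp only [List.reverse_reverse, List.length_reverse, List.nil_append] at h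
  rw [h]
  simp [List.flatMap_def]
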